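-- pv_equiv track=rewrite | github.com/w1ne/iolinki | tools/virtual_master/virtual_master/protocol.py | generate_isdu_read_v11
-- ===== SOURCE A (Python) =====
-- class ISDUControlByte:
--     """IO-Link V1.1.5 ISDU Control Byte bits."""
--     START = 0x80
--     LAST = 0x40
--     SEQ_MASK = 0x3F
--
--     @staticmethod
--     def generate(start: bool, last: bool, seq: int) -> int:
--         cb = (seq & ISDUControlByte.SEQ_MASK)
--         if start: cb |= ISDUControlByte.START
--         if last: cb |= ISDUControlByte.LAST
--         return cb
--
-- def generate_isdu_read_v11(index: int, subindex: int = 0) -> list[int]: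
--     """
--     Generate ISDU Read request BYTES (excluding M-seq framing) for V1.1.5.
--     Interleaves Control Bytes.
--     """
--     data = [
--         0x90, # Read Service, Len 0
--         (index >> 8) & 0xFF,
--         index & 0xFF,
--         subindex
--     ]
--
--     interleaved = []
--     for i, val in enumerate(data):
--         is_start = (i == 0)
--         is_last = (i == len(data) - 1)
--         # Control Byte
--         interleaved.append(ISDUControlByte.generate(is_start, is_last, i))
--         # Data Byte
--         interleaved.append(val)
--
--     return interleaved
-- ===== SOURCE B (Python) =====
-- def generate_isdu_read_v11(index: int, subindex: int = 0) -> list[int]: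
--     """Closed-form ISDU Read request bytes for V1.1.5: the 4-byte payload is
--     fixed, so the interleaved control bytes are constants."""
--     return [
--         0x80, 0x90,                  # start | seq 0, read service
--         0x01, (index >> 8) & 0xFF,   # seq 1, index high byte
--         0x02, index & 0xFF,          # seq 2, index low byte
--         0x43, subindex,              # last | seq 3, subindex
--     ]
-- ===== Notes on version B (the rewrite author's own statement) =====
-- stated objective: simpler
-- what changed: Replaces the enumerate loop and the ISDUControlByte.generate bit-assembly helper with a direct 8-byte list literal whose control bytes are precomputed constants (0x80, 0x01, 0x02, 0x43).
import Mathlib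
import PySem

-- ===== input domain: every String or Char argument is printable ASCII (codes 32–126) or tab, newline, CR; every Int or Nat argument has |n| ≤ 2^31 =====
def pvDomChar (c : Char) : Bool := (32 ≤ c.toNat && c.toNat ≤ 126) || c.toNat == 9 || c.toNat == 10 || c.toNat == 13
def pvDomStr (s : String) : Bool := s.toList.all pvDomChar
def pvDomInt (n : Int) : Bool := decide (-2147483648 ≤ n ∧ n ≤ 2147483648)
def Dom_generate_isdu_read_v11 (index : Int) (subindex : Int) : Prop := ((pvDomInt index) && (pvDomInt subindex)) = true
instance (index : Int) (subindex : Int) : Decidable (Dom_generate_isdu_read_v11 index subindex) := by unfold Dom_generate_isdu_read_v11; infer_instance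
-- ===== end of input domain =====

-- B is simpler: the 4-byte payload is fixed, so A's enumerate loop and control-byte helper collapse to an 8-element list literal with constant control bytes.
-- ===== PORT A =====
def isduControlByte_generate (start : Bool) (last : Bool) (seq : Int) : Int :=
  let cb := PySem.Int.band seq 0x3F
  let cb := if start then PySem.Int.bor cb 0x80 else cb
  let cb := if last then PySem.Int.bor cb 0x40 else cb
  cb

def generate_isdu_read_v11 (index : Int) (subindex : Int) : List Int :=
  let data : List Int := [0x90, PySem.Int.band (index >>> 8) 0xFF, PySem.Int.band index 0xFF, subindex]
  (PySem.List.enumerate data).foldl (fun interleaved iv =>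
    let is_start := iv.1 == 0
    let is_last := iv.1 == (data.length : Int) - 1
    interleaved ++ [isduControlByte_generate is_start is_last iv.1, iv.2]) []

-- ===== PORT B =====
def generate_isdu_read_v11_alt (index : Int) (subindex : Int) : List Int :=
  [0x80, 0x90, 0x01, PySem.Int.band (index >>> 8) 0xFF, 0x02, PySem.Int.band index 0xFF, 0x43, subindex]

-- ===== PRECONDITION & SPEC =====
def Spec_generate_isdu_read_v11 (index : Int) (subindex : Int) (out : List Int) : Prop := out = generate_isdu_read_v11_alt index subindex
instance (index : Int) (subindex : Int) (out : List Int) : Decidable (Spec_generate_isdu_read_v11 index subindex out) := by unfold Spec_generate_isdu_read_v11; infer_instance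

-- ===== CLAIM (what is proved, stated in full; the proofs are below) =====
def Claim_equal_generate_isdu_read_v11 : Prop := ∀ (index : Int) (subindex : Int), Dom_generate_isdu_read_v11 index subindex → Spec_generate_isdu_read_v11 index subindex (generate_isdu_read_v11 index subindex)

-- ===== LEMMAS AND PROOFS =====

-- ===== VERDICT (by name: the statement is the Claim_ definition above) =====
theorem generate_isdu_read_v11_spec : Claim_equal_generate_isdu_read_v11 := by
  intro index subindex _
  show _ = _
  simp [generate_isdu_read_v11, generate_isdu_read_v11_alt, isduControlByte_generate,
    PySem.List.enumerate_cons, PySem.List.enumerate_nil, List.foldl]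
  refine ⟨by decide, by decide, by decide, by decide⟩
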